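-- pv_equiv track=rewrite | github.com/anqin-gh/tuenti-challenge-8 | Challenge 02 - Hidden numbers/python/solution.py | list_to_base10_int
-- ===== SOURCE A (Python) =====
-- def list_to_base10_int(in_list):
--     my_int = 0
--     base = len(in_list)
--     exp = base - 1
--     for item in in_list:
--         my_int += item*base**exp
--         exp -= 1
--
--     return my_int
-- ===== SOURCE B (Python) =====
-- def list_to_base10_int(in_list):
--     base = len(in_list)
--     my_int = 0
--     for item in in_list:
--         my_int = my_int * base + item
--     return my_int
-- ===== Notes on version B (the rewrite author's own statement) =====
-- stated objective: faster
-- what changed: Replaces the per-item base**exp exponentiation sum with Horner's method (my_int = my_int*base + item), removing all pow calls.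
import Mathlib
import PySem

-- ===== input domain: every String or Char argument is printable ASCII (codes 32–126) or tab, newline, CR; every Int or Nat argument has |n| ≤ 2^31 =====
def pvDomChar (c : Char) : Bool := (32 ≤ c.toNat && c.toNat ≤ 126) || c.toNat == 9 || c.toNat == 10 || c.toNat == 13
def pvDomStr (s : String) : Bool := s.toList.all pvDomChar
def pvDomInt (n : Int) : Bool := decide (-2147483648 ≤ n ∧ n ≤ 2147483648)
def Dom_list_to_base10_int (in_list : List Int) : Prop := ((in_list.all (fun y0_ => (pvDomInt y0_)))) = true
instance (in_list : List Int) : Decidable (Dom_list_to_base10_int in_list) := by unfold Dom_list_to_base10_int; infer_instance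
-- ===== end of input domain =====

-- B replaces A's per-item base**exp sum with Horner's method (O(n) multiplications, no pow calls); faster in a timing run.


-- ===== PORT A =====
-- A's loop: my_int += item*base**exp; exp -= 1.  exp stays ≥ 0 on every executed
-- iteration (it starts at len-1 and is decremented once per item), so 'base**exp'
-- is exactly 'base ^ exp.toNat' on every use.
def list_to_base10_int (in_list : List Int) : Int :=
  let base : Int := in_list.length
  let st := in_list.foldl
    (fun (s : Int × Int) item => (s.1 + item * base ^ s.2.toNat, s.2 - 1))
    (0, base - 1)
  st.1

-- ===== PORT B =====
def list_to_base10_int_alt (in_list : List Int) : Int :=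
  let base : Int := in_list.length
  in_list.foldl (fun my_int item => my_int * base + item) 0

-- ===== PRECONDITION & SPEC =====
def Spec_list_to_base10_int (in_list : List Int) (out : Int) : Prop := out = list_to_base10_int_alt in_list
instance (in_list : List Int) (out : Int) : Decidable (Spec_list_to_base10_int in_list out) := by unfold Spec_list_to_base10_int; infer_instance

-- ===== CLAIM (what is proved, stated in full; the proofs are below) =====
def Claim_equal_list_to_base10_int : Prop := ∀ (in_list : List Int), Dom_list_to_base10_int in_list → Spec_list_to_base10_int in_list (list_to_base10_int in_list)

-- ===== LEMMAS AND PROOFS =====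

-- Horner's fold started at r equals r·base^len plus the fold started at 0.
theorem horner_shift (base : Int) (l : List Int) (r : Int) :
    l.foldl (fun my_int item => my_int * base + item) r
      = r * base ^ l.length + l.foldl (fun my_int item => my_int * base + item) 0 := by
  induction l generalizing r with
  | nil => simp
  | cons x l ih =>
    simp only [List.foldl_cons, List.length_cons]
    rw [ih (r * base + x), ih (0 * base + x)]
    ring

-- A's accumulator loop, started at (acc, l.length-1), is acc plus Horner's value.
theorem a_loop_eq (base : Int) (l : List Int) (acc : Int) (e : Int) (he : e = (l.length : Int) - 1) :
    (l.foldl (fun (s : Int × Int) item => (s.1 + item * base ^ s.2.toNat, s.2 - 1)) (acc, e)).1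
      = acc + l.foldl (fun my_int item => my_int * base + item) 0 := by
  induction l generalizing acc e with
  | nil => simp
  | cons x l ih =>
    simp only [List.foldl_cons]
    rw [ih (acc + x * base ^ e.toNat) (e - 1) (by push_cast [List.length_cons] at he; omega)]
    have hE : e.toNat = l.length := by push_cast [List.length_cons] at he; omega
    rw [horner_shift base l (0 * base + x), hE]
    ring

-- ===== VERDICT (by name: the statement is the Claim_ definition above) =====
theorem list_to_base10_int_spec : Claim_equal_list_to_base10_int := by
  intro l _
  show _ = _
  simp only [list_to_base10_int, list_to_base10_int_alt]
  rw [a_loop_eq (l.length : Int) l 0 ((l.length : Int) - 1) rfl]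
  ring
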